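-- pv_equiv track=rewrite | github.com/preetu10/An_Agentic_Graph_RAG_Framework_with_Efficient_Reranking | AGRAG/pruning_agent.py | _quick_fallback_prune
-- ===== SOURCE A (Python) =====
-- from typing import List, Dict, Any, Optional, Tuple, Set
--
-- def _quick_fallback_prune(paths: List[List[str]], query: str) -> List[List[str]]:
--     query_words = set(query.lower().split())
--     scored_paths = []
--
--     for path in paths:
--         path_text = " ".join(path).lower()
--         score = sum(1 for word in query_words if word in path_text)
--         scored_paths.append((score, path))
--
--     scored_paths.sort(reverse=True, key=lambda x: x[0])
--     keep_count = max(1, min(len(paths) // 2, len(paths) - 1))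
--     return [path for _, path in scored_paths[:keep_count]]
-- ===== SOURCE B (Python) =====
-- from typing import List
--
--
-- def _quick_fallback_prune(paths: List[List[str]], query: str) -> List[List[str]]:
--     # Bucket paths by score instead of sorting: scores are bounded by the number
--     # of query words, so counting-sort-style buckets reproduce the stable
--     # reverse sort (descending score, original order within a score).
--     query_words = set(query.lower().split())
--     n = len(query_words)
--     buckets = [[] for _ in range(n + 1)]
--     for path in paths:
--         path_text = " ".join(path).lower()
--         score = len([w for w in query_words if w in path_text])
--         buckets[score].append(path)
--     result = []
--     for bucket in reversed(buckets):
--         result.extend(bucket)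
--     keep_count = max(1, min(len(paths) // 2, len(paths) - 1))
--     return result[:keep_count]
-- ===== Notes on version B (the rewrite author's own statement) =====
-- stated objective: alternative
-- what changed: Replaces the comparison sort over scored paths by a counting-sort-style bucketing: paths are appended to a bucket per score (scores are bounded by the number of query words) and buckets are concatenated from highest score down, reproducing the stable descending order without sorting.
import Mathlib
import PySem

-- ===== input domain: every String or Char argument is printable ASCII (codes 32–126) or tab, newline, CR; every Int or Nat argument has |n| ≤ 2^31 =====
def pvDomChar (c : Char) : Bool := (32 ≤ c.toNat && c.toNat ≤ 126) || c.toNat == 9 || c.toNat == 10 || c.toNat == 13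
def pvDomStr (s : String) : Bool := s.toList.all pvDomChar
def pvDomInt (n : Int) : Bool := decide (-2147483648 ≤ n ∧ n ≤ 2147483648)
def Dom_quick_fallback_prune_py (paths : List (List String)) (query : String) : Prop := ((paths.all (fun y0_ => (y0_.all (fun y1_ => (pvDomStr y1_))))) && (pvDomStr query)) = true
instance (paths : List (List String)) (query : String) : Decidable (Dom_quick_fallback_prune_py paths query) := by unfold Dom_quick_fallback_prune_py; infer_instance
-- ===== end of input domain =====

-- B replaces A's stable reverse sort of scored paths by score-indexed buckets
-- concatenated from the highest score down (alternative algorithm, same output).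

-- ===== PORT A =====
def quick_fallback_prune_py (paths : List (List String)) (query : String) : List (List String) :=
  let query_words : PySem.Set String := PySem.Set.ofList (PySem.Str.split₀ (PySem.Str.lower query))
  let scored_paths : List (Int × List String) :=
    paths.foldl (fun acc path =>
      let path_text := PySem.Str.lower (PySem.Str.join " " path)
      let score : Int := query_words.foldl (fun s word => if PySem.Str.isIn word path_text then s + 1 else s) 0
      acc ++ [(score, path)]) []
  let sorted_paths := PySem.List.sorted scored_paths (fun x => x.1) true
  let keep_count : Int := max 1 (min (PySem.Int.floordiv (paths.length : Int) 2) ((paths.length : Int) - 1))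
  (PySem.List.slice sorted_paths none (some keep_count)).map (fun x => x.2)

-- ===== PORT B =====
def quick_fallback_prune_py_alt (paths : List (List String)) (query : String) : List (List String) :=
  let query_words : PySem.Set String := PySem.Set.ofList (PySem.Str.split₀ (PySem.Str.lower query))
  let n := query_words.length
  let buckets : List (List (List String)) :=
    paths.foldl (fun bs path =>
      let path_text := PySem.Str.lower (PySem.Str.join " " path)
      let score := (query_words.filter (fun w => PySem.Str.isIn w path_text)).length
      bs.set score ((bs.getD score []) ++ [path]))
      (List.replicate (n + 1) [])
  let result := buckets.reverse.foldl (fun acc b => acc ++ b) []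
  let keep_count : Int := max 1 (min (PySem.Int.floordiv (paths.length : Int) 2) ((paths.length : Int) - 1))
  PySem.List.slice result none (some keep_count)

-- ===== PRECONDITION & SPEC =====
def Spec_quick_fallback_prune_py (paths : List (List String)) (query : String) (out : List (List String)) : Prop := out = quick_fallback_prune_py_alt paths query
instance (paths : List (List String)) (query : String) (out : List (List String)) : Decidable (Spec_quick_fallback_prune_py paths query out) := by unfold Spec_quick_fallback_prune_py; infer_instance

-- ===== CLAIM (what is proved, stated in full; the proofs are below) =====
def Claim_equal_quick_fallback_prune_py : Prop := ∀ (paths : List (List String)) (query : String), Dom_quick_fallback_prune_py paths query → Spec_quick_fallback_prune_py paths query (quick_fallback_prune_py paths query)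

-- ===== LEMMAS AND PROOFS =====

-- counting loop = length of the filter
theorem foldl_count_eq_length_filter {α : Type} (p : α → Bool) (l : List α) (c : Int) :
    l.foldl (fun s w => if p w then s + 1 else s) c = c + ((l.filter p).length : Int) := by
  induction l generalizing c with
  | nil => simp
  | cons a t ih =>
    by_cases h : p a = true
    · simp [List.foldl_cons, h, ih]; ring
    · simp [List.foldl_cons, h, ih]

-- insertBy into a split list: skips L1 (all 'not before'), lands before L2 (all 'before')
theorem insertBy_middle {α : Type} (bef : α → α → Bool) (x : α) (L1 L2 : List α)
    (h1 : ∀ y ∈ L1, bef x y = false) (h2 : ∀ y ∈ L2, bef x y = true) :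
    PySem.List.insertBy bef x (L1 ++ L2) = L1 ++ x :: L2 := by
  induction L1 with
  | nil =>
    cases L2 with
    | nil => simp [PySem.List.insertBy]
    | cons b t => simp [PySem.List.insertBy, h2 b (by simp)]
  | cons a t ih =>
    have ha : bef x a = false := h1 a (by simp)
    simp only [List.cons_append, PySem.List.insertBy, ha, Bool.false_eq_true, if_false]
    rw [ih (fun y hy => h1 y (by simp [hy]))]

-- the stable reverse sort by a key whose values all lie in a strictly descending
-- key list ks equals the concatenation of the per-key buckets in ks order
theorem sorted_rev_eq_buckets {α : Type} (key : α → Int) :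
    ∀ (xs : List α) (ks : List Int), ks.Pairwise (· > ·) → (∀ x ∈ xs, key x ∈ ks) →
    PySem.List.sorted xs key true = ks.flatMap (fun k => xs.filter (fun x => decide (key x = k))) := by
  intro xs
  induction xs using List.reverseRecOn with
  | nil => intro ks _ _; simp [PySem.List.sorted]
  | append_singleton xs x ih =>
    intro ks hks hmem
    have hx : key x ∈ ks := hmem x (by simp)
    obtain ⟨k1, k2, rfl⟩ := List.append_of_mem hx
    have hp := hks
    rw [List.pairwise_append] at hp
    obtain ⟨hp1, hp2, hcross⟩ := hp
    rw [List.pairwise_cons] at hp2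
    have hgt1 : ∀ k ∈ k1, key x < k := fun k hk => hcross k hk (key x) (by simp)
    have hlt2 : ∀ k ∈ k2, k < key x := fun k hk => hp2.1 k hk
    have hsorted : PySem.List.sorted (xs ++ [x]) key true
        = PySem.List.insertBy (fun a b => decide (key b < key a)) x (PySem.List.sorted xs key true) := by
      rw [PySem.List.sorted_rev_eq_foldl_insertBy, PySem.List.sorted_rev_eq_foldl_insertBy,
        List.foldl_append]
      rfl
    rw [hsorted, ih (k1 ++ key x :: k2) hks (fun y hy => hmem y (by simp [hy]))]
    -- split the flatMap at the key x bucket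
    have hsplit : (k1 ++ key x :: k2).flatMap (fun k => xs.filter (fun y => decide (key y = k)))
        = (k1.flatMap (fun k => xs.filter (fun y => decide (key y = k)))
            ++ xs.filter (fun y => decide (key y = key x)))
          ++ k2.flatMap (fun k => xs.filter (fun y => decide (key y = k))) := by
      simp [List.flatMap_append]
    have e1 : ∀ (kl : List Int), (∀ k ∈ kl, k ≠ key x) →
        kl.flatMap (fun k => (xs ++ [x]).filter (fun y => decide (key y = k)))
          = kl.flatMap (fun k => xs.filter (fun y => decide (key y = k))) := by
      intro kl hkl
      apply List.flatMap_congr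
      intro k hk
      have : ¬ (key x = k) := fun h => hkl k hk h.symm
      simp [List.filter_append, this]
    have e2 : (xs ++ [x]).filter (fun y => decide (key y = key x))
        = xs.filter (fun y => decide (key y = key x)) ++ [x] := by
      simp [List.filter_append]
    rw [hsplit, insertBy_middle]
    · rw [List.flatMap_append, List.flatMap_cons, e2,
        e1 k1 (fun k hk => by have := hgt1 k hk; omega),
        e1 k2 (fun k hk => by have := hlt2 k hk; omega)]
      simp
    · intro y hy
      simp only [List.mem_append, List.mem_flatMap, List.mem_filter] at hy
      rcases hy with ⟨k, hk, _, hky⟩ | ⟨_, hky⟩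
      · have := hgt1 k hk
        simp only [decide_eq_true_eq] at hky
        simp; omega
      · simp only [decide_eq_true_eq] at hky
        simp; omega
    · intro y hy
      simp only [List.mem_flatMap, List.mem_filter] at hy
      obtain ⟨k, hk, _, hky⟩ := hy
      have := hlt2 k hk
      simp only [decide_eq_true_eq] at hky
      simp; omega

-- B's bucket-building loop computes the per-score filters
theorem buckets_foldl {α : Type} (sc : α → Nat) (n : Nat) :
    ∀ (xs : List α) (g : Nat → List α), (∀ x ∈ xs, sc x ≤ n) →
    xs.foldl (fun bs x => bs.set (sc x) ((bs.getD (sc x) []) ++ [x])) ((List.range (n + 1)).map g)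
      = (List.range (n + 1)).map (fun k => g k ++ xs.filter (fun x => decide (sc x = k))) := by
  intro xs
  induction xs with
  | nil => intro g _; simp
  | cons a t ih =>
    intro g hb
    have hsc : sc a < n + 1 := by have := hb a (by simp); omega
    have hset : ((List.range (n + 1)).map g).set (sc a) (g (sc a) ++ [a])
        = (List.range (n + 1)).map (fun k => if k = sc a then g k ++ [a] else g k) := by
      apply List.ext_getElem
      · simp
      · intro i h1 h2
        simp only [List.length_set, List.length_map, List.length_range] at h1
        rw [List.getElem_set]
        simp only [List.getElem_map, List.getElem_range]
        by_cases h : sc a = i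
        · subst h; simp
        · rw [if_neg h, if_neg (fun hc => h hc.symm)]
    have hgetD : ((List.range (n + 1)).map g).getD (sc a) [] = g (sc a) := by
      rw [List.getD_eq_getElem?_getD, List.getElem?_map]
      simp [List.getElem?_range hsc]
    rw [List.foldl_cons, hgetD, hset, ih _ (fun x hx => hb x (by simp [hx]))]
    apply List.map_congr_left
    intro k hk
    by_cases h : sc a = k
    · simp [h]
    · simp [h, Ne.symm h]

-- ===== VERDICT (by name: the statement is the Claim_ definition above) =====
-- the heart of the equivalence, over an abstract score function bounded by n:
-- A's stable reverse sort of (score, path) pairs, projected to paths, equals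
-- B's bucket concatenation from score n down to 0
theorem core_sort_eq_buckets {α : Type} (sc : α → Nat) (n : Nat) (hscn : ∀ x, sc x ≤ n)
    (paths : List α) :
    (PySem.List.sorted (paths.map (fun p => (((sc p : Nat) : Int), p))) (fun x => x.1) true).map (fun x => x.2)
      = ((paths.foldl (fun bs p => bs.set (sc p) ((bs.getD (sc p) []) ++ [p]))
          (List.replicate (n + 1) [])).reverse.foldl (fun acc b => acc ++ b) []) := by
  have hksp : (List.map (Nat.cast : Nat → Int) ((List.range (n + 1)).reverse)).Pairwise (· > ·) := by
    rw [List.pairwise_map, List.pairwise_reverse]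
    exact List.pairwise_lt_range.imp (by intro a b h; exact_mod_cast h)
  have hmem : ∀ y ∈ paths.map (fun p => (((sc p : Nat) : Int), p)),
      (fun x : Int × α => x.1) y ∈ List.map (Nat.cast : Nat → Int) ((List.range (n + 1)).reverse) := by
    intro y hy
    simp only [List.mem_map] at hy
    obtain ⟨p, _, rfl⟩ := hy
    simp only [List.mem_map, List.mem_reverse, List.mem_range]
    exact ⟨sc p, by have := hscn p; omega, rfl⟩
  rw [sorted_rev_eq_buckets (fun x : Int × α => x.1) _ _ hksp hmem]
  have hrepl : (List.replicate (n + 1) ([] : List α)) = (List.range (n + 1)).map (fun _ => []) := by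
    simp [List.map_const']
  rw [hrepl, buckets_foldl sc n paths (fun _ => []) (fun x _ => hscn x),
    PySem.List.foldl_append_eq_flatMap]
  simp only [List.nil_append]
  rw [← List.map_reverse, List.flatMap_map, List.map_flatMap, List.flatMap_map]
  apply List.flatMap_congr
  intro k _
  rw [List.filter_map]
  simp only [List.map_map]
  have hid : ((fun x : Int × α => x.2) ∘ fun p => (((sc p : Nat) : Int), p)) = id := rfl
  rw [hid, List.map_id]
  apply List.filter_congr
  intro p _
  simp [Function.comp]

set_option maxHeartbeats 1000000 in
theorem quick_fallback_prune_py_spec : Claim_equal_quick_fallback_prune_py := by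
  intro paths query _
  simp only [Spec_quick_fallback_prune_py, quick_fallback_prune_py, quick_fallback_prune_py_alt]
  -- A's score loop computes the length of B's filter
  have hA1 : (paths.foldl (fun acc path =>
      acc ++ [((PySem.Set.ofList (PySem.Str.split₀ (PySem.Str.lower query))).foldl
          (fun s word => if PySem.Str.isIn word (PySem.Str.lower (PySem.Str.join " " path)) then s + 1 else s) (0:Int), path)]) [])
      = paths.map (fun path =>
          ((((PySem.Set.ofList (PySem.Str.split₀ (PySem.Str.lower query))).filter
              (fun w => PySem.Str.isIn w (PySem.Str.lower (PySem.Str.join " " path)))).length : Int), path)) := by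
    rw [PySem.List.foldl_append_singleton_eq_map]
    simp only [List.nil_append]
    apply List.map_congr_left
    intro path _
    rw [foldl_count_eq_length_filter]
    simp
  rw [hA1]
  -- both slices drop the same (nonnegative) prefix length
  have hkeep : (0:Int) ≤ max 1 (min (PySem.Int.floordiv (paths.length : Int) 2) ((paths.length : Int) - 1)) := by
    have h1 : (1:Int) ≤ max 1 (min (PySem.Int.floordiv (paths.length : Int) 2) ((paths.length : Int) - 1)) := le_max_left _ _
    omega
  rw [PySem.List.slice_to _ hkeep, PySem.List.slice_to _ hkeep, List.map_take]
  congr 1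
  exact core_sort_eq_buckets
    (fun path => ((PySem.Set.ofList (PySem.Str.split₀ (PySem.Str.lower query))).filter
        (fun w => PySem.Str.isIn w (PySem.Str.lower (PySem.Str.join " " path)))).length)
    (PySem.Set.ofList (PySem.Str.split₀ (PySem.Str.lower query))).length
    (fun _ => List.length_filter_le _ _) paths
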